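-- pv_equiv track=rewrite | github.com/meeeeju/Python-Algorithm-Study | hyunji/BOJ/BFS,DFS/24230_트리 색칠하기.py | checkColor
-- ===== SOURCE A (Python) =====
-- def checkColor(curr,curr_color,parent,child,color):
--     count=0
--     if color[curr]!=curr_color:
--         count+=1
--         curr_color=color[curr]
--
--     if not len(child[curr]):
--         return count
--
--     for curr_child in child[curr]:
--         if curr_child==parent:
--             continue
--         count+=checkColor(curr_child,curr_color,curr,child,color)
--     return count
-- ===== SOURCE B (Python) =====
-- def checkColor(curr, curr_color, parent, child, color):
--     total = 0
--     stack = [(curr, curr_color, parent)]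
--     while stack:
--         cur, ccol, par = stack.pop()
--         if color[cur] != ccol:
--             total += 1
--             ccol = color[cur]
--         for nxt in child[cur]:
--             if nxt != par:
--                 stack.append((nxt, ccol, cur))
--     return total
-- ===== Notes on version B (the rewrite author's own statement) =====
-- stated objective: alternative
-- what changed: Replaces A's recursion with an explicit LIFO stack of (node, inherited_color, parent) triples and a running total, iterating until the stack is empty.
import Mathlib
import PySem

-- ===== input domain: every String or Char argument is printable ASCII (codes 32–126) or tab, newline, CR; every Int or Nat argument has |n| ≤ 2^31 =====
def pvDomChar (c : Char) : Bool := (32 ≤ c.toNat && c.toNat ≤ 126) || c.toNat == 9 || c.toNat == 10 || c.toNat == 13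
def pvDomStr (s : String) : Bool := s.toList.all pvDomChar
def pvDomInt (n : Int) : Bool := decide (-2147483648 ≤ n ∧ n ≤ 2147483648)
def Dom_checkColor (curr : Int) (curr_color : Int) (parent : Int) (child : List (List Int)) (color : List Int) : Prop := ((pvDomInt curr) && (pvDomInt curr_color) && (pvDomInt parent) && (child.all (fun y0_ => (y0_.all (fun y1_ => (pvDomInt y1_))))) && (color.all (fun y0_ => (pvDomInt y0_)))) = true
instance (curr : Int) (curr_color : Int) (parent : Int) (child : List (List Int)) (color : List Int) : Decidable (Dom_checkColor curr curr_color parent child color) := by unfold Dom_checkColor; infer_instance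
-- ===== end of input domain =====

-- B replaces A's recursion by an explicit LIFO stack of (node, inherited color, parent)
-- triples with a running total (different decomposition, same cost).

-- number of direct child entries in the whole input, and a bound on the number of
-- (node, parent) traversal states: every terminating traversal has depth < pvK
def pvE (child : List (List Int)) : Nat := child.flatten.length
def pvK (child : List (List Int)) : Nat := (pvE child + 2) ^ 2 + 2

-- ===== PORT A =====
-- Literal port of A's recursion, bounded by fuel; inside Pre_ every traversal path
-- is shorter than pvK child, so the fuel never runs out, and every visited index is
-- in range (Python semantics, negative indices from the end), so the pyGetD
-- defaults (Python would raise IndexError) are never taken.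
def checkColorFuelA : Nat → Int → Int → Int → List (List Int) → List Int → Int
  | 0, _, _, _, _, _ => 0
  | fuel+1, curr, curr_color, parent, child, color =>
    let c := PySem.List.pyGetD color curr curr_color   -- color[curr]
    let count : Int := if c ≠ curr_color then 1 else 0
    let curr_color' := if c ≠ curr_color then c else curr_color
    let ch := PySem.List.pyGetD child curr []          -- child[curr]
    if ch.length = 0 then count
    else ch.foldl
      (fun acc curr_child =>
        if curr_child = parent then acc
        else acc + checkColorFuelA fuel curr_child curr_color' curr child color)
      count

def checkColor (curr : Int) (curr_color : Int) (parent : Int) (child : List (List Int)) (color : List Int) : Int :=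
  checkColorFuelA (pvK child) curr curr_color parent child color

-- ===== PORT B =====
-- Literal port of B's while-loop over the stack, bounded by fuel; inside Pre_ the
-- number of pops (the size of the traversal tree) is at most (pvE+2) ^ pvK, so the
-- fuel never runs out.
def checkColorAltLoop : Nat → List (Int × Int × Int) → Int → List (List Int) → List Int → Int
  | _, [], total, _, _ => total
  | 0, _ :: _, total, _, _ => total
  | fuel+1, (cur, ccol, par) :: rest, total, child, color =>
    let c := PySem.List.pyGetD color cur ccol          -- color[cur]
    let total' := if c ≠ ccol then total + 1 else total
    let ccol' := if c ≠ ccol then c else ccol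
    let rest' := (PySem.List.pyGetD child cur []).foldl
      (fun st nxt => if nxt ≠ par then (nxt, ccol', cur) :: st else st) rest
    checkColorAltLoop fuel rest' total' child color

def checkColor_alt (curr : Int) (curr_color : Int) (parent : Int) (child : List (List Int)) (color : List Int) : Int :=
  checkColorAltLoop ((pvE child + 2) ^ pvK child) [(curr, curr_color, parent)] 0 child color

-- ===== PRECONDITION & SPEC =====
-- Walk checker on the INPUT GRAPH only (indices and child lists; it looks at no
-- colors and accumulates nothing): pvWalkOk k c p says that every walk of the
-- traversal graph that starts at node c with parent p, follows child-list edges,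
-- and never steps back to the entry it just came from, visits fewer than k nodes
-- and only nodes that are valid indices into both child and color.
def pvWalkOk : Nat → Int → Int → List (List Int) → List Int → Bool
  | 0, _, _, _, _ => false
  | k+1, c, p, child, color =>
    decide (PySem.Raise.InRange color.length c) &&
    decide (PySem.Raise.InRange child.length c) &&
    (PySem.List.pyGetD child c []).all (fun f => f == p || pvWalkOk k f c child color)

-- Pre_ is exactly A's domain: A's DFS from (curr, parent) raises IndexError or
-- recurses forever precisely when some non-backtracking walk leaves the valid
-- index range or revisits one of the ≤ (pvE+1)·(pvE+2) traversal states (an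
-- infinite walk); pvK child over-counts those states, so Pre_ holds iff the
-- traversal terminates with every index in range.
def Pre_checkColor (curr : Int) (curr_color : Int) (parent : Int) (child : List (List Int)) (color : List Int) : Prop :=
  pvWalkOk (pvK child) curr parent child color = true
instance (curr : Int) (curr_color : Int) (parent : Int) (child : List (List Int)) (color : List Int) : Decidable (Pre_checkColor curr curr_color parent child color) := by unfold Pre_checkColor; infer_instance

def pvWitness_checkColor : Int × Int × Int × List (List Int) × List Int :=
  (0, 0, -1, [[1, 2], [], []], [1, 1, 2])

def Spec_checkColor (curr : Int) (curr_color : Int) (parent : Int) (child : List (List Int)) (color : List Int) (out : Int) : Prop := out = checkColor_alt curr curr_color parent child color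
instance (curr : Int) (curr_color : Int) (parent : Int) (child : List (List Int)) (color : List Int) (out : Int) : Decidable (Spec_checkColor curr curr_color parent child color out) := by unfold Spec_checkColor; infer_instance

-- ===== CLAIM (what is proved, stated in full; the proofs are below) =====
def Claim_equal_checkColor : Prop := ∀ (curr : Int) (curr_color : Int) (parent : Int) (child : List (List Int)) (color : List Int), Dom_checkColor curr curr_color parent child color → Pre_checkColor curr curr_color parent child color → Spec_checkColor curr curr_color parent child color (checkColor curr curr_color parent child color)

-- ===== LEMMAS AND PROOFS =====

-- loop-shape: conditional cons onto a stack
lemma pv_foldl_consif {α : Type} (p : Int) (f : Int → α) :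
    ∀ (l : List Int) (st : List α),
      l.foldl (fun st j => if j ≠ p then f j :: st else st) st
        = ((l.filter (fun j => decide (j ≠ p))).map f).reverse ++ st := by
  intro l
  induction l with
  | nil => intro st; simp
  | cons x l ih =>
    intro st
    by_cases hx : x ≠ p
    · simp only [List.foldl_cons, if_pos hx, ih]
      simp [List.filter_cons, hx]
    · simp only [List.foldl_cons, if_neg hx, ih]
      simp [List.filter_cons, hx]

-- loop-shape: conditional accumulation
lemma pv_foldl_addif (p : Int) (g : Int → Int) :
    ∀ (l : List Int) (a : Int),
      l.foldl (fun acc j => if j = p then acc else acc + g j) a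
        = a + ((l.filter (fun j => decide (j ≠ p))).map g).sum := by
  intro l
  induction l with
  | nil => intro a; simp
  | cons x l ih =>
    intro a
    by_cases hx : x = p
    · simp [List.foldl_cons, hx, ih]
    · simp only [List.foldl_cons, if_neg hx, ih, List.filter_cons]
      simp [hx]
      ring

-- unpacking one step of the walk checker
lemma pv_walk_elim {k : Nat} {c p : Int} {child : List (List Int)} {color : List Int}
    (h : pvWalkOk (k+1) c p child color = true) :
    PySem.Raise.InRange color.length c ∧ PySem.Raise.InRange child.length c ∧
      ∀ f ∈ PySem.List.pyGetD child c [], f ≠ p → pvWalkOk k f c child color = true := by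
  simp only [pvWalkOk, Bool.and_eq_true, decide_eq_true_eq, List.all_eq_true,
    Bool.or_eq_true, beq_iff_eq] at h
  exact ⟨h.1.1, h.1.2, fun f hf hfp => (h.2 f hf).resolve_left hfp⟩

-- walk checker is monotone in the depth bound
lemma pv_A_fuel (child : List (List Int)) (color : List Int) :
    ∀ k c p cc f1 f2, pvWalkOk k c p child color = true → k ≤ f1 → k ≤ f2 →
      checkColorFuelA f1 c cc p child color = checkColorFuelA f2 c cc p child color := by
  intro k
  induction k with
  | zero => intro c p cc f1 f2 h _ _; simp [pvWalkOk] at h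
  | succ k ih =>
    intro c p cc f1 f2 h hf1 hf2
    obtain ⟨a, rfl⟩ : ∃ m, f1 = m + 1 := ⟨f1 - 1, by omega⟩
    obtain ⟨b, rfl⟩ : ∃ m, f2 = m + 1 := ⟨f2 - 1, by omega⟩
    obtain ⟨-, -, h3⟩ := pv_walk_elim h
    simp only [checkColorFuelA]
    split_ifs <;>
      first
      | rfl
      | · apply List.foldl_ext
          intro acc x hx
          by_cases hxp : x = p
          · simp [hxp]
          · simp only [if_neg hxp]
            congr 1
            exact ih x c _ a b (h3 x hx hxp) (by omega) (by omega)

-- one unfolding of A as "local change plus sum over non-parent children"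
lemma pv_A_unfold (child : List (List Int)) (color : List Int)
    (fl : Nat) (c cc p : Int) :
    checkColorFuelA (fl+1) c cc p child color =
      (if PySem.List.pyGetD color c cc ≠ cc then (1 : Int) else 0)
        + (((PySem.List.pyGetD child c []).filter (fun j => decide (j ≠ p))).map
            (fun j => checkColorFuelA fl j (PySem.List.pyGetD color c cc) c child color)).sum := by
  simp only [checkColorFuelA]
  have hcc' : (if PySem.List.pyGetD color c cc ≠ cc then PySem.List.pyGetD color c cc else cc)
      = PySem.List.pyGetD color c cc := by
    split_ifs with h
    · rfl
    · simp only [ne_eq, not_not] at h; exact h.symm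
  rw [hcc']
  by_cases hemp : (PySem.List.pyGetD child c []).length = 0
  · rw [if_pos hemp]
    have hnil : PySem.List.pyGetD child c [] = [] := List.length_eq_zero_iff.mp hemp
    simp [hnil]
  · rw [if_neg hemp, pv_foldl_addif]

-- the stack loop computes the sum of A's values of its entries; each stack entry
-- carries (in the proof only) its walk-depth bound k, and (pvE+2)^k bounds the
-- number of pops that entry can still cause
lemma pv_B_loop (child : List (List Int)) (color : List Int) :
    ∀ fuel (astack : List ((Int × Int × Int) × Nat)) (total : Int),
      (∀ ek ∈ astack, pvWalkOk ek.2 ek.1.1 ek.1.2.2 child color = true ∧ ek.2 ≤ pvK child) →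
      (astack.map (fun ek => (pvE child + 2) ^ ek.2)).sum ≤ fuel →
      checkColorAltLoop fuel (astack.map Prod.fst) total child color =
        total + (astack.map (fun ek =>
          checkColorFuelA (pvK child) ek.1.1 ek.1.2.1 ek.1.2.2 child color)).sum := by
  intro fuel
  induction fuel with
  | zero =>
    intro astack total hok hcost
    match astack with
    | [] => simp [checkColorAltLoop]
    | ek :: rest =>
      exfalso
      have hpos : 0 < (pvE child + 2) ^ ek.2 := pow_pos (by omega) _
      simp only [List.map_cons, List.sum_cons, Nat.le_zero] at hcost
      omega
  | succ fuel ih =>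
    intro astack total hok hcost
    match astack with
    | [] => simp [checkColorAltLoop]
    | ((c, cc, p), k) :: rest =>
      obtain ⟨hw, hkK⟩ := hok _ (List.mem_cons_self ..)
      obtain ⟨k, rfl⟩ : ∃ m, k = m + 1 := by
        cases k with
        | zero => simp [pvWalkOk] at hw
        | succ m => exact ⟨m, rfl⟩
      obtain ⟨hcol, hch, hnext⟩ := pv_walk_elim hw
      simp only [List.map_cons, checkColorAltLoop]
      rw [pv_foldl_consif]
      set col := PySem.List.pyGetD color c cc with hcoldef
      have hcc' : (if col ≠ cc then col else cc) = col := by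
        split_ifs with h
        · rfl
        · simp only [ne_eq, not_not] at h; exact h.symm
      rw [hcc']
      set ch := PySem.List.pyGetD child c [] with hchdef
      set fl := ch.filter (fun j => decide (j ≠ p)) with hfl
      -- the popped list's children are few: ch is one of the lists of child
      have hchlen : ch.length ≤ pvE child := by
        have hn : PySem.List.pyGet? child c ≠ none := by
          intro hnone
          rw [PySem.List.pyGet?_eq_none_iff] at hnone
          exact hnone hch
        obtain ⟨v, hv⟩ := Option.ne_none_iff_exists'.mp hn
        have hvmem : v ∈ child := PySem.List.mem_of_pyGet?_eq_some _ hv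
        have : ch = v := by simp [hchdef, PySem.List.pyGetD, hv]
        rw [this]
        exact (List.sublist_flatten_of_mem hvmem).length_le
      have hfllen : fl.length ≤ pvE child := le_trans (List.length_filter_le _ _) hchlen
      -- the annotated successor stack
      have hrw := ih ((fl.map (fun f => ((f, col, c), k))).reverse ++ rest) (if col ≠ cc then total + 1 else total)
        (by
          intro ek he
          rcases List.mem_append.mp he with he | he
          · obtain ⟨f, hf, rfl⟩ := List.mem_map.mp (List.mem_reverse.mp he)
            have hfmem := List.mem_filter.mp hf
            refine ⟨hnext f hfmem.1 (by simpa using hfmem.2), by omega⟩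
          · exact hok _ (List.mem_cons_of_mem _ he))
        (by
          rw [List.map_append, List.sum_append, List.map_reverse, List.sum_reverse,
            List.map_map]
          simp only [List.map_cons, List.sum_cons] at hcost
          have hconst : (fl.map ((fun ek : (Int × Int × Int) × Nat => (pvE child + 2) ^ ek.2) ∘
              (fun f => ((f, col, c), k)))).sum = fl.length * (pvE child + 2) ^ k := by
            have hcf : (fl.map ((fun ek : (Int × Int × Int) × Nat => (pvE child + 2) ^ ek.2) ∘
                (fun f => ((f, col, c), k)))) = fl.map (fun _ => (pvE child + 2) ^ k) := rfl
            rw [hcf, List.map_const', List.sum_replicate, smul_eq_mul]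
          rw [hconst]
          have hb : fl.length * (pvE child + 2) ^ k ≤ (pvE child + 1) * (pvE child + 2) ^ k :=
            Nat.mul_le_mul_right _ (by omega)
          have hpow : (pvE child + 2) ^ (k + 1) = (pvE child + 2) * (pvE child + 2) ^ k := by
            ring
          have hpos : 0 < (pvE child + 2) ^ k := pow_pos (by omega) _
          have hlink : (pvE child + 1) * (pvE child + 2) ^ k + (pvE child + 2) ^ k
              = (pvE child + 2) * (pvE child + 2) ^ k := by ring
          omega)
      have hmapfst : (((fl.map (fun f => ((f, col, c), k))).reverse ++ rest).map Prod.fst)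
          = (fl.map (fun f => (f, col, c))).reverse ++ rest.map Prod.fst := by
        rw [List.map_append, List.map_reverse, List.map_map]
        rfl
      rw [hmapfst] at hrw
      rw [hrw]
      -- A's value of the popped entry
      have hAhead : checkColorFuelA (pvK child) c cc p child color =
          (if col ≠ cc then (1 : Int) else 0)
            + (fl.map (fun f => checkColorFuelA (pvK child) f col c child color)).sum := by
        rw [pv_A_fuel child color (k+1) c p cc (pvK child) (k+1) hw hkK (le_refl _),
          pv_A_unfold]
        congr 1
        apply congrArg
        apply List.map_congr_left
        intro f hf
        have hfmem := List.mem_filter.mp hf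
        exact pv_A_fuel child color k f c col k (pvK child)
          (hnext f hfmem.1 (by simpa using hfmem.2)) (le_refl _) (by omega)
      rw [List.map_append, List.sum_append, List.map_reverse, List.sum_reverse,
        List.map_map]
      simp only [List.map_cons, List.sum_cons]
      rw [hAhead]
      have hmc : (fl.map ((fun ek : (Int × Int × Int) × Nat =>
            checkColorFuelA (pvK child) ek.1.1 ek.1.2.1 ek.1.2.2 child color) ∘
            (fun f => ((f, col, c), k)))) =
          fl.map (fun f => checkColorFuelA (pvK child) f col c child color) := rfl
      rw [hmc]
      split_ifs <;> ring

-- ===== VERDICT (by name: the statement is the Claim_ definition above) =====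
theorem checkColor_spec : Claim_equal_checkColor := by
  intro curr cc parent child color _ hpre
  unfold Spec_checkColor checkColor checkColor_alt
  have h := pv_B_loop child color ((pvE child + 2) ^ pvK child)
    [((curr, cc, parent), pvK child)] 0
    (by intro ek he; simp at he; subst he; exact ⟨hpre, le_refl _⟩)
    (by simp)
  simp only [List.map_cons, List.map_nil, List.sum_cons, List.sum_nil] at h
  rw [h]
  ring
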